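-- pv_equiv track=rewrite | github.com/francis-fra/hackerrank | pycode/basic_python/string_transformation.py | transformSentence
-- ===== SOURCE A (Python) =====
-- def transformSentence(sentence):
--     # initialize
--     arr = [x for x in sentence]
--     is_prev_space = True
--     y = ''
--     for idx, x in enumerate(arr):
--         if not is_prev_space:
--             if ord(y.lower()) < ord(x.lower()):
--                 arr[idx] = x.upper()
--             elif ord(y.lower()) > ord(x.lower()):
--                 arr[idx] = x.lower()
--             else:
--                 arr[idx] = x
--         # update state
--         if x != ' ':
--             is_prev_space = False
--         else:
--             is_prev_space = True
--         y = x
--     return "".join(arr)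
-- ===== SOURCE B (Python) =====
-- def _tw(word):
--     if not word:
--         return word
--     out = [word[0]]
--     for p, x in zip(word, word[1:]):
--         if ord(p.lower()) < ord(x.lower()):
--             out.append(x.upper())
--         elif ord(p.lower()) > ord(x.lower()):
--             out.append(x.lower())
--         else:
--             out.append(x)
--     return ''.join(out)
--
-- def transformSentence(sentence):
--     return ' '.join(_tw(w) for w in sentence.split(' '))
-- ===== Notes on version B (the rewrite author's own statement) =====
-- stated objective: alternative
-- what changed: Replaces A's single-pass is_prev_space/previous-char state machine over individual characters by a word-oriented decomposition: split on ' ' keeping empties, keep each word's first character and transform the rest by comparing adjacent original characters, rejoin with ' '.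
import Mathlib
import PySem

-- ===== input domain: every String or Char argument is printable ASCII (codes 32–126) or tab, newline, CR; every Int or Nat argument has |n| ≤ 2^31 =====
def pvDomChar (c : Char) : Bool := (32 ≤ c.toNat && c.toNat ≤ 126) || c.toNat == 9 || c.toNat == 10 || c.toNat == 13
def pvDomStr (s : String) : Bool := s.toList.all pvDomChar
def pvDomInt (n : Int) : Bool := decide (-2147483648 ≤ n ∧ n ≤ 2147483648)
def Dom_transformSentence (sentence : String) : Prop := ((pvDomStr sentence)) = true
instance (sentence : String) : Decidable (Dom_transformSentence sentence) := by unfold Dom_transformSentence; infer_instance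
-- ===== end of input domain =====

-- B replaces A's is_prev_space/y character state machine by a word-oriented decomposition:
-- split on ' ' (keeping empties), transform each word against its own previous characters, rejoin.
-- Objective: alternative decomposition (same cost); equivalence proved for all strings.

-- ===== PORT A =====
-- A's per-character loop: state (is_prev_space, y = previous char); the initial y = '' is never
-- read (is_prev_space is True on the first iteration), so it is carried as a dummy ' '.
def pvLoopA (isPrevSpace : Bool) (y : Char) : List Char → List Char
  | [] => []
  | x :: rest =>
    let x' :=
      if isPrevSpace = false then
        if (PySem.Chars.lowerChar y).toNat < (PySem.Chars.lowerChar x).toNat then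
          PySem.Chars.upperChar x
        else if (PySem.Chars.lowerChar y).toNat > (PySem.Chars.lowerChar x).toNat then
          PySem.Chars.lowerChar x
        else x
      else x
    x' :: pvLoopA (decide (x = ' ')) x rest

def transformSentence (sentence : String) : String :=
  String.ofList (pvLoopA true ' ' sentence.toList)

-- ===== PORT B =====
-- hand port of str.split(' ') (split at every space, keeping empty pieces); exact: CPython's
-- s.split(sep) with a one-character sep cuts at each occurrence and keeps empties.
def pvSplitSp : List Char → List (List Char)
  | [] => [[]]
  | c :: rest =>
    if c = ' ' then [] :: pvSplitSp rest
    else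
      match pvSplitSp rest with
      | w :: ws => (c :: w) :: ws
      | [] => [[c]]   -- unreachable: pvSplitSp never returns []

-- hand port of ' '.join(...); exact: join with a single-space separator.
def pvJoinSp : List (List Char) → List Char
  | [] => []
  | [w] => w
  | w :: ws => w ++ ' ' :: pvJoinSp ws

-- the per-pair transformation of Source B's loop body
def pvCmpCh (p x : Char) : Char :=
  if (PySem.Chars.lowerChar p).toNat < (PySem.Chars.lowerChar x).toNat then PySem.Chars.upperChar x
  else if (PySem.Chars.lowerChar p).toNat > (PySem.Chars.lowerChar x).toNat then PySem.Chars.lowerChar x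
  else x

-- Source B's 'for p, x in zip(word, word[1:])' loop, carrying the previous char
def pvTwGo (p : Char) : List Char → List Char
  | [] => []
  | x :: rest => pvCmpCh p x :: pvTwGo x rest

-- _tw: empty word unchanged, first char kept, rest transformed against the previous char
def pvTw : List Char → List Char
  | [] => []
  | c :: rest => c :: pvTwGo c rest

def transformSentence_alt (sentence : String) : String :=
  String.ofList (pvJoinSp ((pvSplitSp sentence.toList).map pvTw))

-- ===== PRECONDITION & SPEC =====
def Spec_transformSentence (sentence : String) (out : String) : Prop := out = transformSentence_alt sentence
instance (sentence : String) (out : String) : Decidable (Spec_transformSentence sentence out) := by unfold Spec_transformSentence; infer_instance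

-- ===== CLAIM (what is proved, stated in full; the proofs are below) =====
def Claim_equal_transformSentence : Prop := ∀ (sentence : String), Dom_transformSentence sentence → Spec_transformSentence sentence (transformSentence sentence)

-- ===== LEMMAS AND PROOFS =====

-- common reference form: a mutual pair of state machines ("previous was a space" / "previous was p")
mutual
def pvHSp : List Char → List Char
  | [] => []
  | x :: rest => if x = ' ' then ' ' :: pvHSp rest else x :: pvHGo x rest
def pvHGo (p : Char) : List Char → List Char
  | [] => []
  | x :: rest => if x = ' ' then ' ' :: pvHSp rest else pvCmpCh p x :: pvHGo x rest
end

-- joining helper for the proof of the B side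
def pvTailJoin : List (List Char) → List Char
  | [] => []
  | w :: ws => ' ' :: pvJoinSp (w :: ws)

theorem pvJoinSp_cons (w : List Char) (ws : List (List Char)) :
    pvJoinSp (w :: ws) = w ++ pvTailJoin ws := by
  cases ws <;> simp [pvJoinSp, pvTailJoin]

theorem pvTailJoin_eq_of_ne_nil (ws : List (List Char)) (h : ws ≠ []) :
    pvTailJoin ws = ' ' :: pvJoinSp ws := by
  cases ws with
  | nil => exact absurd rfl h
  | cons w ws => rfl

theorem pvSplitSp_ne_nil (l : List Char) : pvSplitSp l ≠ [] := by
  induction l with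
  | nil => simp [pvSplitSp]
  | cons c rest ih =>
    simp only [pvSplitSp]
    split
    · simp
    · cases h : pvSplitSp rest with
      | nil => exact absurd h ih
      | cons w ws => simp

-- A's comparison applied to a space yields a space, whatever y is
theorem pvCmpCh_space (y : Char) : pvCmpCh y ' ' = ' ' := by
  unfold pvCmpCh
  split_ifs <;> simp [PySem.Chars.upperChar, PySem.Chars.lowerChar] <;> rfl

-- A's loop equals the reference machine
theorem pvLoopA_eq (l : List Char) :
    (∀ y, pvLoopA true y l = pvHSp l) ∧ (∀ p, pvLoopA false p l = pvHGo p l) := by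
  induction l with
  | nil => exact ⟨fun _ => rfl, fun _ => rfl⟩
  | cons x rest ih =>
    constructor
    · intro y
      by_cases hx : x = ' '
      · subst hx; simp [pvLoopA, pvHSp, ih.1]
      · simp [pvLoopA, pvHSp, hx, ih.2]
    · intro p
      by_cases hx : x = ' '
      · subst hx
        have hc : pvCmpCh p ' ' = ' ' := pvCmpCh_space p
        simp [pvLoopA, pvHGo, pvCmpCh] at hc ⊢
        simpa [hc] using ih.1 ' '
      · simp [pvLoopA, pvHGo, hx, pvCmpCh, ih.2]

-- B's split/transform/join equals the reference machine
theorem pvB_eq (l : List Char) :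
    (pvJoinSp ((pvSplitSp l).map pvTw) = pvHSp l) ∧
    (∀ p w ws, pvSplitSp l = w :: ws →
      pvTwGo p w ++ pvTailJoin (ws.map pvTw) = pvHGo p l) := by
  induction l with
  | nil =>
    constructor
    · simp [pvSplitSp, pvJoinSp, pvTw, pvHSp]
    · intro p w ws h
      simp [pvSplitSp] at h
      obtain ⟨rfl, rfl⟩ := h
      simp [pvTwGo, pvTailJoin, pvHGo]
  | cons x rest ih =>
    by_cases hx : x = ' '
    · subst hx
      have hsplit : pvSplitSp (' ' :: rest) = [] :: pvSplitSp rest := by simp [pvSplitSp]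
      have hne : (pvSplitSp rest).map pvTw ≠ [] := by
        simp [pvSplitSp_ne_nil rest]
      constructor
      · rw [hsplit, List.map_cons, pvJoinSp_cons, pvTailJoin_eq_of_ne_nil _ hne, ih.1]
        simp [pvHSp, pvTw]
      · intro p w ws h
        rw [hsplit] at h
        injection h with h1 h2
        subst h1; subst h2
        rw [pvTailJoin_eq_of_ne_nil _ hne, ih.1]
        simp [pvTwGo, pvHGo]
    · cases hS : pvSplitSp rest with
      | nil => exact absurd hS (pvSplitSp_ne_nil rest)
      | cons w' ws' =>
        have hsplit : pvSplitSp (x :: rest) = (x :: w') :: ws' := by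
          simp [pvSplitSp, hx, hS]
        constructor
        · rw [hsplit]
          simp only [List.map_cons, pvTw]
          rw [pvJoinSp_cons, List.cons_append]
          rw [ih.2 x w' ws' hS]
          simp [pvHSp, hx]
        · intro p w ws h
          rw [hsplit] at h
          injection h with h1 h2
          subst h1; subst h2
          simp only [pvTwGo, List.cons_append]
          rw [ih.2 x w' ws' hS]
          simp [pvHGo, hx]

theorem transformSentence_spec : Claim_equal_transformSentence := by
  intro sentence _
  unfold Spec_transformSentence transformSentence transformSentence_alt
  rw [(pvLoopA_eq sentence.toList).1 ' ', (pvB_eq sentence.toList).1]
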